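-- pv_equiv track=rewrite | github.com/eseoean/new_pipeline | scripts/run_hybrid_pipeline.py | summarize_feature_blocks
-- ===== SOURCE A (Python) =====
-- def summarize_feature_blocks(feature_names: list[str]) -> dict[str, int]:
--     return {
--         "crispr": sum(c.startswith("sample__crispr__") for c in feature_names),
--         "morgan": sum(c.startswith("drug_morgan_") for c in feature_names),
--         "smiles_svd": sum(c.startswith("smiles_svd_") for c in feature_names),
--         "lincs_gene": sum(c.startswith("drug__lincs__") for c in feature_names),
--         "lincs_summary": sum(c.startswith("drug__lincs_summary_") for c in feature_names),
--         "target_pair": sum(c.startswith("pair__") or c.startswith("drug__target") for c in feature_names),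
--         "context": sum((c.startswith("sample__") and not c.startswith("sample__crispr__")) or c.startswith("ctxcat__") for c in feature_names),
--     }
-- ===== SOURCE B (Python) =====
-- def summarize_feature_blocks(feature_names: list[str]) -> dict[str, int]:
--     counts = {
--         "crispr": 0,
--         "morgan": 0,
--         "smiles_svd": 0,
--         "lincs_gene": 0,
--         "lincs_summary": 0,
--         "target_pair": 0,
--         "context": 0,
--     }
--     for c in feature_names:
--         if c.startswith("sample__crispr__"):
--             counts["crispr"] += 1
--         if c.startswith("drug_morgan_"):
--             counts["morgan"] += 1
--         if c.startswith("smiles_svd_"):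
--             counts["smiles_svd"] += 1
--         if c.startswith("drug__lincs__"):
--             counts["lincs_gene"] += 1
--         if c.startswith("drug__lincs_summary_"):
--             counts["lincs_summary"] += 1
--         if c.startswith("pair__") or c.startswith("drug__target"):
--             counts["target_pair"] += 1
--         if (c.startswith("sample__") and not c.startswith("sample__crispr__")) or c.startswith("ctxcat__"):
--             counts["context"] += 1
--     return counts
-- ===== Notes on version B (the rewrite author's own statement) =====
-- stated objective: alternative
-- what changed: Seven independent sum-comprehension passes over feature_names are replaced by one single pass that maintains all seven counters at once (independent if-blocks preserve double-counting of overlapping prefixes).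
import Mathlib
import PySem

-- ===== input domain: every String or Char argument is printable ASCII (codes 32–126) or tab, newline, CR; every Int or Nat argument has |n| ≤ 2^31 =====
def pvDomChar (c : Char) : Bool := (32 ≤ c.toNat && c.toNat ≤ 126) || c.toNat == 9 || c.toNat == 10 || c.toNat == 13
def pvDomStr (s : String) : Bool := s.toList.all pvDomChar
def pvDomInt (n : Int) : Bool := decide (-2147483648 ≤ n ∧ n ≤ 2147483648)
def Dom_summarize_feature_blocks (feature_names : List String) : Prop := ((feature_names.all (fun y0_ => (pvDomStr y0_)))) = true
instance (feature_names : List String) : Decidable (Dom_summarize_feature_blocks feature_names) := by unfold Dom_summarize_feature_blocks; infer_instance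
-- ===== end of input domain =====

-- B replaces A's seven separate sum-comprehension passes by one single pass maintaining all seven counters.

-- ===== PORT A =====
-- A: seven independent generator-sum passes over feature_names, assembled into a dict literal.
def summarize_feature_blocks (feature_names : List String) : List (String × Int) :=
  [ ("crispr", feature_names.foldl (fun a c => a + (if PySem.Str.startswith c "sample__crispr__" then 1 else 0)) 0),
    ("morgan", feature_names.foldl (fun a c => a + (if PySem.Str.startswith c "drug_morgan_" then 1 else 0)) 0),
    ("smiles_svd", feature_names.foldl (fun a c => a + (if PySem.Str.startswith c "smiles_svd_" then 1 else 0)) 0),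
    ("lincs_gene", feature_names.foldl (fun a c => a + (if PySem.Str.startswith c "drug__lincs__" then 1 else 0)) 0),
    ("lincs_summary", feature_names.foldl (fun a c => a + (if PySem.Str.startswith c "drug__lincs_summary_" then 1 else 0)) 0),
    ("target_pair", feature_names.foldl (fun a c => a + (if PySem.Str.startswith c "pair__" || PySem.Str.startswith c "drug__target" then 1 else 0)) 0),
    ("context", feature_names.foldl (fun a c => a + (if (PySem.Str.startswith c "sample__" && !PySem.Str.startswith c "sample__crispr__") || PySem.Str.startswith c "ctxcat__" then 1 else 0)) 0) ]

-- ===== PORT B =====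
-- B: one pass, the seven counters carried as a single state record (the loop body mirrors Source B's if-blocks).
structure FBCounts where
  crispr : Int
  morgan : Int
  smiles_svd : Int
  lincs_gene : Int
  lincs_summary : Int
  target_pair : Int
  context : Int
deriving DecidableEq, Repr

def fbStep (s : FBCounts) (c : String) : FBCounts :=
  let s := if PySem.Str.startswith c "sample__crispr__" then { s with crispr := s.crispr + 1 } else s
  let s := if PySem.Str.startswith c "drug_morgan_" then { s with morgan := s.morgan + 1 } else s
  let s := if PySem.Str.startswith c "smiles_svd_" then { s with smiles_svd := s.smiles_svd + 1 } else s
  let s := if PySem.Str.startswith c "drug__lincs__" then { s with lincs_gene := s.lincs_gene + 1 } else s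
  let s := if PySem.Str.startswith c "drug__lincs_summary_" then { s with lincs_summary := s.lincs_summary + 1 } else s
  let s := if PySem.Str.startswith c "pair__" || PySem.Str.startswith c "drug__target" then { s with target_pair := s.target_pair + 1 } else s
  let s := if (PySem.Str.startswith c "sample__" && !PySem.Str.startswith c "sample__crispr__") || PySem.Str.startswith c "ctxcat__" then { s with context := s.context + 1 } else s
  s

def summarize_feature_blocks_alt (feature_names : List String) : List (String × Int) :=
  let s := feature_names.foldl fbStep ⟨0, 0, 0, 0, 0, 0, 0⟩
  [ ("crispr", s.crispr), ("morgan", s.morgan), ("smiles_svd", s.smiles_svd),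
    ("lincs_gene", s.lincs_gene), ("lincs_summary", s.lincs_summary),
    ("target_pair", s.target_pair), ("context", s.context) ]

-- ===== PRECONDITION & SPEC =====
def Spec_summarize_feature_blocks (feature_names : List String) (out : List (String × Int)) : Prop := out = summarize_feature_blocks_alt feature_names
instance (feature_names : List String) (out : List (String × Int)) : Decidable (Spec_summarize_feature_blocks feature_names out) := by unfold Spec_summarize_feature_blocks; infer_instance

-- ===== CLAIM (what is proved, stated in full; the proofs are below) =====
def Claim_equal_summarize_feature_blocks : Prop := ∀ (feature_names : List String), Dom_summarize_feature_blocks feature_names → Spec_summarize_feature_blocks feature_names (summarize_feature_blocks feature_names)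

-- ===== LEMMAS AND PROOFS =====

-- each counter of one fused step is the old counter plus its own test
theorem fbStep_crispr (s : FBCounts) (c : String) :
    (fbStep s c).crispr = s.crispr + (if PySem.Str.startswith c "sample__crispr__" then 1 else 0) := by
  unfold fbStep; split_ifs <;> simp
theorem fbStep_morgan (s : FBCounts) (c : String) :
    (fbStep s c).morgan = s.morgan + (if PySem.Str.startswith c "drug_morgan_" then 1 else 0) := by
  unfold fbStep; split_ifs <;> simp
theorem fbStep_smiles_svd (s : FBCounts) (c : String) :
    (fbStep s c).smiles_svd = s.smiles_svd + (if PySem.Str.startswith c "smiles_svd_" then 1 else 0) := by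
  unfold fbStep; split_ifs <;> simp
theorem fbStep_lincs_gene (s : FBCounts) (c : String) :
    (fbStep s c).lincs_gene = s.lincs_gene + (if PySem.Str.startswith c "drug__lincs__" then 1 else 0) := by
  unfold fbStep; split_ifs <;> simp
theorem fbStep_lincs_summary (s : FBCounts) (c : String) :
    (fbStep s c).lincs_summary = s.lincs_summary + (if PySem.Str.startswith c "drug__lincs_summary_" then 1 else 0) := by
  unfold fbStep; split_ifs <;> simp
theorem fbStep_target_pair (s : FBCounts) (c : String) :
    (fbStep s c).target_pair = s.target_pair + (if PySem.Str.startswith c "pair__" || PySem.Str.startswith c "drug__target" then 1 else 0) := by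
  unfold fbStep; split_ifs <;> simp
theorem fbStep_context (s : FBCounts) (c : String) :
    (fbStep s c).context = s.context + (if (PySem.Str.startswith c "sample__" && !PySem.Str.startswith c "sample__crispr__") || PySem.Str.startswith c "ctxcat__" then 1 else 0) := by
  unfold fbStep; split_ifs <;> simp

-- the fused fold computes the tuple of the seven independent folds
theorem fb_fold_eq (feature_names : List String) (s : FBCounts) :
    feature_names.foldl fbStep s =
      ⟨ feature_names.foldl (fun a c => a + (if PySem.Str.startswith c "sample__crispr__" then 1 else 0)) s.crispr,
        feature_names.foldl (fun a c => a + (if PySem.Str.startswith c "drug_morgan_" then 1 else 0)) s.morgan,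
        feature_names.foldl (fun a c => a + (if PySem.Str.startswith c "smiles_svd_" then 1 else 0)) s.smiles_svd,
        feature_names.foldl (fun a c => a + (if PySem.Str.startswith c "drug__lincs__" then 1 else 0)) s.lincs_gene,
        feature_names.foldl (fun a c => a + (if PySem.Str.startswith c "drug__lincs_summary_" then 1 else 0)) s.lincs_summary,
        feature_names.foldl (fun a c => a + (if PySem.Str.startswith c "pair__" || PySem.Str.startswith c "drug__target" then 1 else 0)) s.target_pair,
        feature_names.foldl (fun a c => a + (if (PySem.Str.startswith c "sample__" && !PySem.Str.startswith c "sample__crispr__") || PySem.Str.startswith c "ctxcat__" then 1 else 0)) s.context ⟩ := by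
  induction feature_names generalizing s with
  | nil => rfl
  | cons c cs ih =>
      simp only [List.foldl_cons, ih, fbStep_crispr, fbStep_morgan, fbStep_smiles_svd,
        fbStep_lincs_gene, fbStep_lincs_summary, fbStep_target_pair, fbStep_context]

-- ===== VERDICT (by name: the statement is the Claim_ definition above) =====
theorem summarize_feature_blocks_spec : Claim_equal_summarize_feature_blocks := by
  intro fn _
  show _ = _
  simp [summarize_feature_blocks, summarize_feature_blocks_alt, fb_fold_eq]
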